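-- pv_equiv track=rewrite | github.com/Bigmango1892/ppbabi | ppbabi/renew/calceig.py | _calc_weight
-- ===== SOURCE A (Python) =====
-- def _calc_weight(word_list: list):
--     title_pos = []
--     for pos in range(len(word_list)):
--         if len(''.join(word_list[pos])) < 8:
--             title_pos.append(pos)
--     title_pos.append(len(word_list))
--     weight = []
--     for i in range(len(title_pos) - 1):
--         weight.append(0)
--         weight.extend(_activation_func(title_pos[i+1] - title_pos[i] - 1))
--     return weight
--
-- def _activation_func(n: int):
--     alpha = 1
--     result = []
--     tmp = 1
--     for i in range(n):
--         result.append(tmp)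
--         tmp = tmp * alpha
--     return result
-- ===== SOURCE B (Python) =====
-- def _calc_weight(word_list: list):
--     weight = []
--     started = False
--     for words in word_list:
--         short = len(''.join(words)) < 8
--         started = started or short
--         if started:
--             weight.append(0 if short else 1)
--     return weight
-- ===== Notes on version B (the rewrite author's own statement) =====
-- stated objective: simpler
-- what changed: Replaced A's two-stage construction (build an index list of short-word positions plus a sentinel, then a second pass emitting 0 and extending with _activation_func over each gap) by a single linear pass over word_list with a boolean 'started' flag, inlining _activation_func away.
import Mathlib
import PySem

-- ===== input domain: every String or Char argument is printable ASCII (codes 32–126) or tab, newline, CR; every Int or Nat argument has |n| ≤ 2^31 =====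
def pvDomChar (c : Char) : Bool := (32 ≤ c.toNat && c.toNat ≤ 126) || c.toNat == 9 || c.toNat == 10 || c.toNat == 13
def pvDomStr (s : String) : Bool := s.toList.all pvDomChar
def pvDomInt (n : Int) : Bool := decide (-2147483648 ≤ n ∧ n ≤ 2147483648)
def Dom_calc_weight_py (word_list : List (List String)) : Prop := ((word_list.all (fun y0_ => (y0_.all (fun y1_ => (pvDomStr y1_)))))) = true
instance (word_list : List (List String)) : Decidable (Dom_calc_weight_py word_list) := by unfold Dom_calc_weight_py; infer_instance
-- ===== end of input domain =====

-- B replaces A's two-stage pass (short-position index list + gap expansion via _activation_func)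
-- by one linear scan with a 'started' flag; objective: simpler (same asymptotic cost).

-- ===== PORT A =====
-- helper: Python _activation_func (alpha = 1, tmp multiplied each step, kept literally)
def pv_activation_func (n : Int) : List Int :=
  let alpha : Int := 1
  ((PySem.List.pyRange 0 n 1).foldl
    (fun (st : List Int × Int) _ => (st.1 ++ [st.2], st.2 * alpha)) ([], 1)).1

def calc_weight_py (word_list : List (List String)) : List Int :=
  let title_pos : List Int :=
    (PySem.List.pyRange 0 (PySem.List.len word_list) 1).foldl
      (fun acc pos =>
        if PySem.Str.len (PySem.Str.join "" (PySem.List.pyGetD word_list pos [])) < 8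
        then acc ++ [pos] else acc) []
  let title_pos := title_pos ++ [PySem.List.len word_list]
  (PySem.List.pyRange 0 (PySem.List.len title_pos - 1) 1).foldl
    (fun weight i =>
      (weight ++ [(0 : Int)]) ++ pv_activation_func
        (PySem.List.pyGetD title_pos (i + 1) 0 - PySem.List.pyGetD title_pos i 0 - 1))
    []

-- ===== PORT B =====
def calc_weight_py_alt (word_list : List (List String)) : List Int :=
  (word_list.foldl
    (fun (st : List Int × Bool) words =>
      let short : Bool := decide (PySem.Str.len (PySem.Str.join "" words) < 8)
      let started : Bool := st.2 || short
      (if started then st.1 ++ [if short then (0 : Int) else 1] else st.1, started))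
    ([], false)).1

-- ===== PRECONDITION & SPEC =====
def Spec_calc_weight_py (word_list : List (List String)) (out : List Int) : Prop := out = calc_weight_py_alt word_list
instance (word_list : List (List String)) (out : List Int) : Decidable (Spec_calc_weight_py word_list out) := by unfold Spec_calc_weight_py; infer_instance

-- ===== CLAIM (what is proved, stated in full; the proofs are below) =====
def Claim_equal_calc_weight_py : Prop := ∀ (word_list : List (List String)), Dom_calc_weight_py word_list → Spec_calc_weight_py word_list (calc_weight_py word_list)

-- ===== LEMMAS AND PROOFS =====

-- the shortness test shared (in spirit) by both programs
def pvSh (ws : List String) : Bool := decide (PySem.Str.len (PySem.Str.join "" ws) < 8)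

-- positions (from offset k) of short entries
def pvPos (xs : List (List String)) (k : Nat) : List Nat :=
  match xs with
  | [] => []
  | w :: t => if pvSh w then k :: pvPos t (k + 1) else pvPos t (k + 1)

-- A's second loop as structural recursion over consecutive pairs of (positions ++ [n])
def pvPairs (ps : List Nat) (n : Nat) : List Int :=
  match ps with
  | [] => []
  | [a] => 0 :: List.replicate ((n : Int) - (a : Int) - 1).toNat 1
  | a :: b :: t => (0 :: List.replicate ((b : Int) - (a : Int) - 1).toNat 1) ++ pvPairs (b :: t) n

def pvWeightOf (xs : List (List String)) : List Int :=
  (xs.dropWhile (fun w => !pvSh w)).map (fun w => if pvSh w then (0 : Int) else 1)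

theorem pv_act_foldl (l : List Int) (acc : List Int) :
    ((l.foldl (fun (st : List Int × Int) _ => (st.1 ++ [st.2], st.2 * 1)) (acc, 1)).1)
      = acc ++ List.replicate l.length 1 := by
  induction l generalizing acc with
  | nil => simp
  | cons x t ih =>
      simp only [List.foldl_cons, List.length_cons]
      rw [mul_one, ih]
      simp [List.replicate_succ]

theorem pv_act_eq (n : Int) : pv_activation_func n = List.replicate n.toNat 1 := by
  simp only [pv_activation_func]
  rw [pv_act_foldl]
  simp [PySem.List.pyRange_zero]

-- A's first loop: filter over range, from offset form
theorem pv_pos_eq (xs : List (List String)) (i : Nat) :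
    ((List.range xs.length).filter (fun k => pvSh (xs.getD k []))).map (· + i)
      = pvPos xs i := by
  induction xs generalizing i with
  | nil => simp [pvPos]
  | cons w t ih =>
      have h1 : (List.range (w :: t).length).filter (fun k => pvSh ((w :: t).getD k []))
          = (if pvSh w then [0] else [])
            ++ ((List.range t.length).filter (fun k => pvSh (t.getD k []))).map Nat.succ := by
        rw [List.length_cons, List.range_succ_eq_map, List.filter_cons]
        have h2 : List.filter (fun k => pvSh ((w :: t).getD k []))
              (List.map Nat.succ (List.range t.length))
            = List.map Nat.succ (List.filter
                ((fun k => pvSh ((w :: t).getD k [])) ∘ Nat.succ) (List.range t.length)) :=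
          List.filter_map
        rw [h2]
        have h3 : ((fun k => pvSh ((w :: t).getD k [])) ∘ Nat.succ)
            = fun k => pvSh (t.getD k []) := by
          funext k
          simp only [Function.comp_apply, Nat.succ_eq_add_one, List.getD_cons_succ]
        rw [h3]
        by_cases h : pvSh w
        · simp [h]
        · simp [h]
      rw [h1]
      have h4 : ((· + i) ∘ Nat.succ : Nat → Nat) = (· + (i + 1)) := by
        funext k
        simp only [Function.comp_apply, Nat.succ_eq_add_one]
        omega
      by_cases h : pvSh w
      · rw [if_pos h]
        simp only [List.map_append, List.map_map, List.map_cons, List.map_nil, h4, ih]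
        simp [pvPos, h]
      · rw [if_neg h]
        simp only [List.nil_append, List.map_map, h4, ih]
        simp [pvPos, h]

-- flatMap over the index range = structural pairs recursion
theorem pv_flat_pairs (ps : List Nat) (n : Nat) :
    (List.range ps.length).flatMap
        (fun k => 0 :: List.replicate
          ((ps.map ((fun a : Nat => (a : Int))) ++ [(n : Int)]).getD (k + 1) 0
            - (ps.map ((fun a : Nat => (a : Int))) ++ [(n : Int)]).getD k 0 - 1).toNat 1)
      = pvPairs ps n := by
  induction ps with
  | nil => simp [pvPairs]
  | cons a t ih =>
      have hr : List.range (a :: t).length = 0 :: (List.range t.length).map Nat.succ := by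
        simp [List.range_succ_eq_map]
      rw [hr]
      simp only [List.flatMap_cons, List.flatMap_map]
      have hshift : ∀ k : Nat,
          ((a :: t).map ((fun a : Nat => (a : Int))) ++ [(n : Int)]).getD (k + 1) 0
            = (t.map ((fun a : Nat => (a : Int))) ++ [(n : Int)]).getD k 0 := by
        intro k; simp
      cases t with
      | nil => simp [pvPairs]
      | cons b t' =>
          have hbody : (fun k => 0 :: List.replicate
               (((a :: b :: t').map ((fun a : Nat => (a : Int))) ++ [(n : Int)]).getD (Nat.succ k + 1) 0
                 - ((a :: b :: t').map ((fun a : Nat => (a : Int))) ++ [(n : Int)]).getD (Nat.succ k) 0 - 1).toNat (1:Int))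
              = (fun k => 0 :: List.replicate
               (((b :: t').map ((fun a : Nat => (a : Int))) ++ [(n : Int)]).getD (k + 1) 0
                 - ((b :: t').map ((fun a : Nat => (a : Int))) ++ [(n : Int)]).getD k 0 - 1).toNat (1:Int)) := by
            funext k; simp
          rw [hbody, ih]
          simp [pvPairs]

theorem pv_pos_nil_iff (xs : List (List String)) (k : Nat) :
    pvPos xs k = [] ↔ ∀ w ∈ xs, pvSh w = false := by
  induction xs generalizing k with
  | nil => simp [pvPos]
  | cons w t ih =>
      simp only [pvPos]
      by_cases h : pvSh w
      · simp [h]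
      · simp only [h, if_neg, Bool.false_eq_true, not_false_iff, if_false]
        rw [ih (k + 1)]
        simp [h]

theorem pv_pos_head (xs : List (List String)) (k b : Nat)
    (h : (pvPos xs k).head? = some b) :
    b = k + (xs.takeWhile (fun w => !pvSh w)).length := by
  induction xs generalizing k with
  | nil => simp [pvPos] at h
  | cons w t ih =>
      by_cases hw : pvSh w
      · simp [pvPos, hw] at h
        simp [List.takeWhile_cons, hw, h]
      · simp only [pvPos, hw, Bool.false_eq_true, not_false_iff, if_false] at h
        have := ih (k + 1) h
        simp [hw, this]
        omega

theorem pv_all_false_map (t : List (List String)) (h : ∀ w ∈ t, pvSh w = false) :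
    t.map (fun w => if pvSh w then (0 : Int) else 1) = List.replicate t.length 1 := by
  induction t with
  | nil => simp
  | cons w t' ih =>
      have hw := h w (by simp)
      simp only [List.map_cons, hw, Bool.false_eq_true, if_false, List.length_cons,
        List.replicate_succ]
      rw [ih (fun x hx => h x (by simp [hx]))]

theorem pv_pairs_eq (xs : List (List String)) (k : Nat) :
    pvPairs (pvPos xs k) (xs.length + k) = pvWeightOf xs := by
  induction xs generalizing k with
  | nil => simp [pvPos, pvPairs, pvWeightOf]
  | cons w t ih =>
      by_cases hw : pvSh w
      · -- started here: output 0 then map the whole tail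
        simp only [pvPos, hw, if_pos]
        have hrest : pvWeightOf (w :: t)
            = 0 :: t.map (fun w => if pvSh w then (0 : Int) else 1) := by
          simp [pvWeightOf, List.dropWhile_cons, hw]
        cases hps : pvPos t (k + 1) with
        | nil =>
            have hall : ∀ x ∈ t, pvSh x = false := (pv_pos_nil_iff t (k + 1)).mp hps
            simp only [pvPairs, hrest]
            rw [pv_all_false_map t hall]
            congr 1
            congr 1
            simp [List.length_cons]
        | cons b ps' =>
            have hb : b = (k + 1) + (t.takeWhile (fun w => !pvSh w)).length := by
              apply pv_pos_head t (k + 1) b; simp [hps]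
            have hsplitmap : t.map (fun w => if pvSh w then (0 : Int) else 1)
                = List.replicate (t.takeWhile (fun w => !pvSh w)).length 1 ++ pvWeightOf t := by
              conv_lhs => rw [← List.takeWhile_append_dropWhile (p := fun w => !pvSh w) (l := t)]
              rw [List.map_append]
              unfold pvWeightOf
              congr 1
              apply pv_all_false_map
              intro x hx
              have := List.mem_takeWhile_imp hx
              simpa using this
            simp only [pvPairs, hrest, hsplitmap]
            have hgap : ((b : Int) - (k : Int) - 1).toNat
                = (t.takeWhile (fun w => !pvSh w)).length := by
              rw [hb]; push_cast; omega
            have hlen : (w :: t).length + k = t.length + (k + 1) := by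
              simp [List.length_cons]; omega
            rw [hgap, hlen, ← hps, ih (k + 1)]
            simp
      · simp only [pvPos, hw, Bool.false_eq_true, not_false_iff, if_false]
        have hlen : (w :: t).length + k = t.length + (k + 1) := by
          simp [List.length_cons]; omega
        rw [hlen, ih (k + 1)]
        simp [pvWeightOf, List.dropWhile_cons, hw]

-- A's first loop result, named
theorem pv_title_eq (word_list : List (List String)) :
    (PySem.List.pyRange 0 (PySem.List.len word_list) 1).foldl
      (fun acc pos =>
        if PySem.Str.len (PySem.Str.join "" (PySem.List.pyGetD word_list pos [])) < 8
        then acc ++ [pos] else acc) []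
      = (pvPos word_list 0).map (fun a : Nat => (a : Int)) := by
  rw [PySem.List.foldl_append_ite_eq_filter]
  have hlen : PySem.List.len word_list = ((word_list.length : Nat) : Int) := by
    simp [PySem.List.len_eq]
  rw [hlen, PySem.List.pyRange_zero_nat, List.nil_append, List.filter_map]
  have hpred : ((fun pos => decide (PySem.Str.len (PySem.Str.join "" (PySem.List.pyGetD word_list pos [])) < 8))
        ∘ (fun k : Nat => (k : Int)))
      = fun k => pvSh (word_list.getD k []) := by
    funext k
    simp [Function.comp, pvSh, PySem.List.pyGetD_natCast]
  rw [hpred]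
  have hpos := pv_pos_eq word_list 0
  simp only [Nat.add_zero, List.map_id'] at hpos
  rw [hpos]

-- A equals the dropWhile/map normal form
theorem pv_A_eq (word_list : List (List String)) :
    calc_weight_py word_list = pvWeightOf word_list := by
  simp only [calc_weight_py]
  rw [pv_title_eq]
  have hact : (fun (weight : List Int) (i : Int) =>
        (weight ++ [(0 : Int)]) ++ pv_activation_func
          (PySem.List.pyGetD ((pvPos word_list 0).map (fun a : Nat => (a : Int)) ++ [PySem.List.len word_list]) (i + 1) 0
            - PySem.List.pyGetD ((pvPos word_list 0).map (fun a : Nat => (a : Int)) ++ [PySem.List.len word_list]) i 0 - 1))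
      = fun (weight : List Int) (i : Int) =>
        weight ++ ((0 : Int) :: List.replicate
          ((PySem.List.pyGetD ((pvPos word_list 0).map (fun a : Nat => (a : Int)) ++ [PySem.List.len word_list]) (i + 1) 0
            - PySem.List.pyGetD ((pvPos word_list 0).map (fun a : Nat => (a : Int)) ++ [PySem.List.len word_list]) i 0 - 1).toNat) 1) := by
    funext weight i
    rw [pv_act_eq, List.append_assoc]
    rfl
  rw [hact, PySem.List.foldl_append_eq_flatMap, List.nil_append]
  have hlen2 : PySem.List.len ((pvPos word_list 0).map (fun a : Nat => (a : Int)) ++ [PySem.List.len word_list]) - 1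
      = (((pvPos word_list 0).length : Nat) : Int) := by
    simp [PySem.List.len_eq]
  rw [hlen2, PySem.List.pyRange_zero_nat, List.flatMap_map]
  have hlenN : PySem.List.len word_list = ((word_list.length : Nat) : Int) := by
    simp [PySem.List.len_eq]
  have hfinal : List.flatMap
      (fun k : Nat => (0 : Int) :: List.replicate
        ((((pvPos word_list 0).map (fun a : Nat => (a : Int)) ++ [((word_list.length : Nat) : Int)]).getD (k + 1) 0
          - ((pvPos word_list 0).map (fun a : Nat => (a : Int)) ++ [((word_list.length : Nat) : Int)]).getD k 0 - 1).toNat) 1)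
      (List.range (pvPos word_list 0).length) = pvWeightOf word_list := by
    rw [pv_flat_pairs]
    have := pv_pairs_eq word_list 0
    simpa using this
  rw [← hfinal]
  congr 1
  funext k
  rw [hlenN]
  rw [show ((k : Int) + 1) = (((k + 1 : Nat)) : Int) from by push_cast; ring]
  rw [PySem.List.pyGetD_natCast, PySem.List.pyGetD_natCast]

-- B's loop body, named
def pvFB (st : List Int × Bool) (words : List String) : List Int × Bool :=
  let short : Bool := decide (PySem.Str.len (PySem.Str.join "" words) < 8)
  let started : Bool := st.2 || short
  (if started then st.1 ++ [if short then (0 : Int) else 1] else st.1, started)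

theorem pvFB_true (l : List (List String)) (acc : List Int) :
    (l.foldl pvFB (acc, true)).1 = acc ++ l.map (fun w => if pvSh w then (0 : Int) else 1) := by
  induction l generalizing acc with
  | nil => simp
  | cons w t ih =>
      simp only [List.foldl_cons, pvFB, Bool.true_or, if_pos, List.map_cons]
      rw [ih]
      simp [pvSh]

theorem pvFB_false (l : List (List String)) (acc : List Int) :
    (l.foldl pvFB (acc, false)).1 = acc ++ pvWeightOf l := by
  induction l generalizing acc with
  | nil => simp [pvWeightOf]
  | cons w t ih =>
      by_cases hw : pvSh w
      · have hw' : decide (PySem.Str.len (PySem.Str.join "" w) < 8) = true := hw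
        simp only [List.foldl_cons, pvFB, hw', Bool.false_or, if_pos, Bool.false_eq_true]
        rw [pvFB_true]
        simp [pvWeightOf, List.dropWhile_cons, hw]
      · have hw' : decide (PySem.Str.len (PySem.Str.join "" w) < 8) = false := by
          simpa [pvSh] using hw
        simp only [List.foldl_cons, pvFB, hw', Bool.false_or, if_neg]
        rw [ih]
        simp [pvWeightOf, List.dropWhile_cons, hw]

-- B equals the dropWhile/map normal form
theorem pv_B_eq (word_list : List (List String)) :
    calc_weight_py_alt word_list = pvWeightOf word_list := by
  have : calc_weight_py_alt word_list = (word_list.foldl pvFB ([], false)).1 := rfl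
  rw [this, pvFB_false]
  simp

-- ===== VERDICT (by name: the statement is the Claim_ definition above) =====
theorem calc_weight_py_spec : Claim_equal_calc_weight_py := by
  intro word_list _
  unfold Spec_calc_weight_py
  rw [pv_A_eq, pv_B_eq]
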